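-- pv_equiv track=rewrite | github.com/r1x4rx/Python | 44.py | eliminarcapicua
-- ===== SOURCE A (Python) =====
-- def eliminarcapicua(lista):
--     if lista == []:
--         return []
--     elif len(lista) == 1:
--         return []
--     elif len(lista) == 2:
--         return []
--     elif lista[0] == lista[-1]:
--         return eliminarcapicua(lista[1:-1])
--     else:
--         return [lista[0]] + eliminarcapicua(lista[1:-1]) + [lista[-1]]
-- ===== SOURCE B (Python) =====
-- def eliminarcapicua(lista):
--     left = []
--     right = []
--     i = 0
--     j = len(lista) - 1
--     while j - i >= 2:
--         a = lista[i]
--         b = lista[j]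
--         if a != b:
--             left.append(a)
--             right.append(b)
--         i += 1
--         j -= 1
--     right.reverse()
--     return left + right
-- ===== Notes on version B (the rewrite author's own statement) =====
-- stated objective: faster
-- what changed: Replaces A's recursion that copies a slice lista[1:-1] at every level by a single iterative two-pointer pass that walks inward accumulating kept left/right ends, with one reverse at the end.
import Mathlib
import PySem

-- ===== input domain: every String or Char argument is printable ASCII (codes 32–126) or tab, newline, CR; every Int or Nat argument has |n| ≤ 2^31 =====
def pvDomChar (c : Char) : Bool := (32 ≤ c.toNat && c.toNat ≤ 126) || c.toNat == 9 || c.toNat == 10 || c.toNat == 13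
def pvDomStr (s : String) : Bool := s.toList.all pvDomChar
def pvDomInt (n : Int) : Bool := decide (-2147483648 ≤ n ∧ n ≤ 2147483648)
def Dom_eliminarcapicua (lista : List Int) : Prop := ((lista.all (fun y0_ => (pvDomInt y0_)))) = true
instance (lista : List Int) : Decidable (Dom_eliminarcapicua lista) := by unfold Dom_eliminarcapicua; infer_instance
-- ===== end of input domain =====

-- B replaces A's quadratic recursion-on-slices by a single two-pointer pass (no slicing); a timing run decides the speed label.

-- ===== PORT A =====
def eliminarcapicua (lista : List Int) : List Int :=
  if lista = [] then []
  else if lista.length = 1 then []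
  else if lista.length = 2 then []
  else if PySem.List.pyGetD lista 0 0 = PySem.List.pyGetD lista (-1) 0 then
    eliminarcapicua (PySem.List.slice lista (some 1) (some (-1)))
  else
    [PySem.List.pyGetD lista 0 0] ++ eliminarcapicua (PySem.List.slice lista (some 1) (some (-1))) ++ [PySem.List.pyGetD lista (-1) 0]
termination_by lista.length
decreasing_by
  all_goals
    (have hne : lista ≠ [] := by assumption
     have := List.length_pos_of_ne_nil hne
     simp [PySem.List.length_slice, PySem.List.clampIdx, hne]
     omega)

-- ===== PORT B =====
-- the while-loop of Source B: two pointers i, j walking inward, accumulating kept ends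
def pvAltLoop (lista : List Int) (i j : Int) (left right : List Int) : List Int × List Int :=
  if _h : j - i ≥ 2 then
    let a := PySem.List.pyGetD lista i 0
    let b := PySem.List.pyGetD lista j 0
    if a ≠ b then pvAltLoop lista (i + 1) (j - 1) (left ++ [a]) (right ++ [b])
    else pvAltLoop lista (i + 1) (j - 1) left right
  else (left, right)
termination_by (j - i).toNat
decreasing_by all_goals omega

def eliminarcapicua_alt (lista : List Int) : List Int :=
  let p := pvAltLoop lista 0 ((lista.length : Int) - 1) [] []
  p.1 ++ p.2.reverse

-- ===== PRECONDITION & SPEC =====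
def Spec_eliminarcapicua (lista : List Int) (out : List Int) : Prop := out = eliminarcapicua_alt lista
instance (lista : List Int) (out : List Int) : Decidable (Spec_eliminarcapicua lista out) := by unfold Spec_eliminarcapicua; infer_instance

-- ===== CLAIM (what is proved, stated in full; the proofs are below) =====
def Claim_equal_eliminarcapicua : Prop := ∀ (lista : List Int), Dom_eliminarcapicua lista → Spec_eliminarcapicua lista (eliminarcapicua lista)

-- ===== LEMMAS AND PROOFS =====

-- A returns [] on lists of length ≤ 2
lemma A_short (xs : List Int) (h : xs.length ≤ 2) : eliminarcapicua xs = [] := by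
  match xs, h with
  | [], _ => simp [eliminarcapicua]
  | [a], _ => simp [eliminarcapicua]
  | [a, b], _ => simp [eliminarcapicua]

-- xs[1:-1] on a nonempty list is tail-then-dropLast
lemma slice_one_neg_one (xs : List Int) (h : 1 ≤ xs.length) :
    PySem.List.slice xs (some 1) (some (-1)) = xs.tail.dropLast := by
  have hne : xs ≠ [] := by intro h0; simp [h0] at h
  simp [PySem.List.slice, PySem.List.clampIdx, hne, List.dropLast_eq_take, ← List.drop_one,
        Nat.min_eq_left h]
  omega

-- structural one-step unfolding of A for length ≥ 3, in drop/take vocabulary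
lemma A_step (xs : List Int) (h : 3 ≤ xs.length) :
    eliminarcapicua xs =
      if xs.getD 0 0 = xs.getD (xs.length - 1) 0 then eliminarcapicua (xs.tail.dropLast)
      else xs.getD 0 0 :: (eliminarcapicua (xs.tail.dropLast) ++ [xs.getD (xs.length - 1) 0]) := by
  have hne : xs ≠ [] := by intro h0; simp [h0] at h
  rw [eliminarcapicua]
  rw [if_neg hne, if_neg (by omega : ¬ xs.length = 1), if_neg (by omega : ¬ xs.length = 2),
      slice_one_neg_one xs (by omega),
      PySem.List.pyGetD_neg_ofNat xs 1 0 (by omega) (by omega), PySem.List.pyGetD_zero,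
      List.getD_eq_getElem xs 0 (by omega : 0 < xs.length),
      List.getD_eq_getElem xs 0 (by omega : xs.length - 1 < xs.length)]
  simp

-- getD on a drop/take segment reads the underlying list
lemma seg_getD (xs : List Int) (a k n : Nat) (hk : k < n) (han : a + n ≤ xs.length) :
    ((xs.drop a).take n).getD k 0 = xs[a + k]'(by omega) := by
  rw [List.getD_eq_getElem _ 0 (by simp; omega)]
  simp [List.getElem_take, List.getElem_drop]

-- the middle of a drop/take segment is a drop/take segment
lemma seg_mid (xs : List Int) (a n : Nat) (hn : 2 ≤ n) (han : a + n ≤ xs.length) :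
    ((xs.drop a).take n).tail.dropLast = (xs.drop (a + 1)).take (n - 2) := by
  rw [← List.drop_one, List.drop_take, List.drop_drop, List.dropLast_eq_take, List.take_take]
  congr 1
  simp
  omega

-- loop invariant: the two-pointer loop computes A of the remaining segment
lemma key (n : Nat) : ∀ (xs : List Int) (i j : Int) (l r : List Int), (j - i).toNat ≤ n →
    0 ≤ i → j < (xs.length : Int) →
    (pvAltLoop xs i j l r).1 ++ ((pvAltLoop xs i j l r).2).reverse
      = l ++ eliminarcapicua ((xs.drop i.toNat).take ((j + 1 - i).toNat)) ++ r.reverse := by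
  induction n with
  | zero =>
    intro xs i j l r h hi hj
    rw [pvAltLoop, dif_neg (by omega : ¬ j - i ≥ 2)]
    rw [A_short _ (by simp; omega)]
    simp
  | succ n ih =>
    intro xs i j l r h hi hj
    by_cases hcond : j - i ≥ 2
    · -- loop body runs
      have hjn : j.toNat < xs.length := by omega
      have hseg : i.toNat + (j + 1 - i).toNat ≤ xs.length := by omega
      have hlen3 : 3 ≤ (j + 1 - i).toNat := by omega
      have ha : PySem.List.pyGetD xs i 0
          = ((xs.drop i.toNat).take ((j + 1 - i).toNat)).getD 0 0 := by
        rw [PySem.List.pyGetD_eq_getElem xs 0 hi (by omega),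
            seg_getD xs i.toNat 0 ((j + 1 - i).toNat) (by omega) hseg]
        simp
      have hb : PySem.List.pyGetD xs j 0
          = ((xs.drop i.toNat).take ((j + 1 - i).toNat)).getD
              (((xs.drop i.toNat).take ((j + 1 - i).toNat)).length - 1) 0 := by
        have hl : ((xs.drop i.toNat).take ((j + 1 - i).toNat)).length = (j + 1 - i).toNat := by
          simp; omega
        rw [PySem.List.pyGetD_eq_getElem xs 0 (by omega) hj, hl,
            seg_getD xs i.toNat ((j + 1 - i).toNat - 1) ((j + 1 - i).toNat) (by omega) hseg]
        congr 1
        omega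
      have hm : ((xs.drop i.toNat).take ((j + 1 - i).toNat)).tail.dropLast
          = (xs.drop (i + 1).toNat).take ((j - 1 + 1 - (i + 1)).toNat) := by
        rw [seg_mid xs i.toNat ((j + 1 - i).toNat) (by omega) hseg,
            (by omega : (j + 1 - i).toNat - 2 = (j - 1 + 1 - (i + 1)).toNat),
            (by omega : i.toNat + 1 = (i + 1).toNat)]
      rw [pvAltLoop, dif_pos hcond,
          A_step ((xs.drop i.toNat).take ((j + 1 - i).toNat)) (by simp; omega),
          ← ha, ← hb, hm]
      by_cases hab : PySem.List.pyGetD xs i 0 = PySem.List.pyGetD xs j 0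
      · rw [if_pos hab, if_neg (by simp [hab])]
        exact ih xs (i + 1) (j - 1) l r (by omega) (by omega) (by omega)
      · rw [if_neg hab, if_pos (by simp [hab])]
        rw [ih xs (i + 1) (j - 1) (l ++ [PySem.List.pyGetD xs i 0])
              (r ++ [PySem.List.pyGetD xs j 0]) (by omega) (by omega) (by omega)]
        simp
    · -- loop exits
      rw [pvAltLoop, dif_neg hcond]
      rw [A_short _ (by simp; omega)]
      simp

-- ===== VERDICT (by name: the statement is the Claim_ definition above) =====
theorem eliminarcapicua_spec : Claim_equal_eliminarcapicua := by
  intro lista _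
  unfold Spec_eliminarcapicua eliminarcapicua_alt
  have h := key ((lista.length : Int) - 1).toNat lista 0 ((lista.length : Int) - 1) [] []
    (by omega) (by omega) (by omega)
  simp only [Int.toNat_zero, List.drop_zero, List.append_nil, List.reverse_nil,
    List.nil_append] at h
  rw [(by omega : ((lista.length : Int) - 1 + 1 - 0).toNat = lista.length),
      List.take_length] at h
  simp only []
  exact h.symm
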